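-- pv_equiv track=rewrite | github.com/RepakaDivyaSree/CS-313E | Triangle.py | exhaustive_search
-- ===== SOURCE A (Python) =====
-- def exhaustive_search (grid):
--
--   paths = path_finder (grid)
--
--   n = len(grid)
--
--   maximum = 0
--   for path in paths:
--
--     path_sum = 0
--     for i in range(n):
--       x = grid[i][path[i]]
--       path_sum += x
--
--     if path_sum > maximum:
--       maximum = path_sum
--
--   return maximum
--
-- def path_finder(grid):
--   n = len(grid)
--
--   paths = [[0]]
--
--   for _ in range(1, n+1):
--     new_paths = []
--     for path in paths:
--       j = path[-1]
--       new_path_a = path[:]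
--       new_path_b = path[:]
--       new_path_a.append(j)
--       new_path_b.append(j+1)
--       new_paths.append(new_path_a)
--       new_paths.append(new_path_b)
--
--     paths = new_paths
--
--   return paths
-- ===== SOURCE B (Python) =====
-- def exhaustive_search(grid):
--   dp = [0] * (len(grid) + 1)
--   for row in reversed(grid):
--     dp = [row[j] + max(dp[j], dp[j + 1]) for j in range(len(dp) - 1)]
--   return max(dp[0], 0)
-- ===== Notes on version B (the rewrite author's own statement) =====
-- stated objective: faster
-- what changed: Replaces A's explicit enumeration of all 2^n root-to-bottom paths (build every path list, then sum each) by a bottom-up dynamic program that keeps one DP row of best-suffix sums per triangle row.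
import Mathlib
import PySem

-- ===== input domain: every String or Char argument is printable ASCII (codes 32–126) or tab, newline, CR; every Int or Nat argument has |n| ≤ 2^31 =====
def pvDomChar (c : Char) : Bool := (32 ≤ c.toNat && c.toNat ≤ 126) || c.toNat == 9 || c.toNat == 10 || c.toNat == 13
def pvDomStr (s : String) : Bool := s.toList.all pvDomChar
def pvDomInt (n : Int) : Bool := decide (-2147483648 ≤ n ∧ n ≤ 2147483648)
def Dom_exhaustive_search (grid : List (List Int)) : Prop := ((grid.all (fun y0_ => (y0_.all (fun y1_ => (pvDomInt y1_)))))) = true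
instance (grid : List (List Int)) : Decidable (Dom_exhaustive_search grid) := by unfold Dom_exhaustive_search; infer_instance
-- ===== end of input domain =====

-- B replaces A's exhaustive enumeration of all 2^n root-to-bottom paths by a bottom-up
-- dynamic program over the triangle rows (O(n^2) instead of O(n·2^n)); same return value.

-- ===== PORT A =====
-- helper of A: one extension round of the path list (the inner 'for path in paths' loop)
def pf_step (paths : List (List Int)) : List (List Int) :=
  paths.foldl (fun np p =>
    let j := PySem.List.pyGetD p (-1) 0
    np ++ [p ++ [j], p ++ [j + 1]]) []

def path_finder (grid : List (List Int)) : List (List Int) :=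
  let n := grid.length
  (PySem.List.pyRange 1 ((n : Int) + 1) 1).foldl (fun paths _ => pf_step paths) [[0]]

def exhaustive_search (grid : List (List Int)) : Int :=
  let paths := path_finder grid
  let n := grid.length
  paths.foldl (fun maximum path =>
    let path_sum := (PySem.List.pyRange 0 (n : Int) 1).foldl
      (fun acc i => acc + PySem.List.pyGetD (PySem.List.pyGetD grid i []) (PySem.List.pyGetD path i 0) 0) 0
    if path_sum > maximum then path_sum else maximum) 0

-- ===== PORT B =====
-- helper of B: one DP row update (the list comprehension in Source B)
def alt_step (dp : List Int) (row : List Int) : List Int :=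
  (PySem.List.pyRange 0 ((dp.length : Int) - 1) 1).map
    (fun j => PySem.List.pyGetD row j 0 +
      max (PySem.List.pyGetD dp j 0) (PySem.List.pyGetD dp (j + 1) 0))

def exhaustive_search_alt (grid : List (List Int)) : Int :=
  let dp := grid.reverse.foldl alt_step (List.replicate (grid.length + 1) 0)
  max (PySem.List.pyGetD dp 0 0) 0

-- ===== PRECONDITION & SPEC =====
-- Pre_ excludes exactly the non-triangle grids (row i shorter than i+1 entries), on which
-- the Python A raises IndexError while indexing grid[i][path[i]] (B raises there too).
def Pre_exhaustive_search (grid : List (List Int)) : Prop :=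
  ∀ i < grid.length, i < (grid.getD i []).length
instance (grid : List (List Int)) : Decidable (Pre_exhaustive_search grid) := by
  unfold Pre_exhaustive_search; infer_instance

def pvWitness_exhaustive_search : List (List Int) := [[1], [2, 3], [4, 5, 6]]

def Spec_exhaustive_search (grid : List (List Int)) (out : Int) : Prop := out = exhaustive_search_alt grid
instance (grid : List (List Int)) (out : Int) : Decidable (Spec_exhaustive_search grid out) := by unfold Spec_exhaustive_search; infer_instance

-- ===== CLAIM (what is proved, stated in full; the proofs are below) =====
def Claim_equal_exhaustive_search : Prop := ∀ (grid : List (List Int)), Dom_exhaustive_search grid → Pre_exhaustive_search grid → Spec_exhaustive_search grid (exhaustive_search grid)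

-- ===== LEMMAS AND PROOFS =====

-- Maximum path sum from column j through the rows rs (the common specification).
def gspec : List (List Int) → Int → Int
  | [], _ => 0
  | r :: rs, j => PySem.List.pyGetD r j 0 + max (gspec rs j) (gspec rs (j + 1))

-- Path sum: pair rows with the path's columns from the front.
def msum : List (List Int) → List Int → Int
  | [], _ => 0
  | _ :: _, [] => 0
  | r :: rs, c :: p => PySem.List.pyGetD r c 0 + msum rs p

@[simp] theorem msum_nil (p : List Int) : msum [] p = 0 := rfl

-- The tails appended by k extension rounds to a path ending at column j.
def Tails : Nat → Int → List (List Int)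
  | 0, _ => [[]]
  | k + 1, j => (Tails k j).map (j :: ·) ++ (Tails k (j + 1)).map ((j + 1) :: ·)

-- max of a nonempty list (0 on [], never used there).
def bmax : List Int → Int
  | [] => 0
  | [x] => x
  | x :: y :: t => max x (bmax (y :: t))

theorem bmax_cons (x : Int) (l : List Int) (h : l ≠ []) :
    bmax (x :: l) = max x (bmax l) := by
  cases l with
  | nil => exact absurd rfl h
  | cons y t => rfl

theorem bmax_append (l1 l2 : List Int) (h1 : l1 ≠ []) (h2 : l2 ≠ []) :
    bmax (l1 ++ l2) = max (bmax l1) (bmax l2) := by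
  induction l1 with
  | nil => exact absurd rfl h1
  | cons x t ih =>
    cases t with
    | nil => simpa [bmax] using bmax_cons x l2 h2
    | cons y s =>
      rw [List.cons_append, bmax_cons x _ (by simp), ih (by simp),
        bmax_cons x _ (by simp), max_assoc]

theorem bmax_map_add (c : Int) (l : List Int) (h : l ≠ []) :
    bmax (l.map (fun x => c + x)) = c + bmax l := by
  induction l with
  | nil => exact absurd rfl h
  | cons x t ih =>
    cases t with
    | nil => simp [bmax]
    | cons y s =>
      rw [List.map_cons, bmax_cons _ _ (by simp), ih (by simp),
        bmax_cons x _ (by simp)]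
      omega

theorem foldl_max_eq_bmax (l : List Int) (a : Int) (h : l ≠ []) :
    l.foldl max a = max a (bmax l) := by
  induction l generalizing a with
  | nil => exact absurd rfl h
  | cons x t ih =>
    cases t with
    | nil => simp [bmax]
    | cons y s =>
      rw [List.foldl_cons, ih (max a x) (by simp), bmax_cons x _ (by simp), max_assoc]

theorem Tails_ne_nil (k : Nat) (j : Int) : Tails k j ≠ [] := by
  cases k with
  | zero => simp [Tails]
  | succ m =>
    simp only [Tails, ne_eq, List.append_eq_nil_iff, List.map_eq_nil_iff, not_and]
    intro h; exact absurd h (Tails_ne_nil m j)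

theorem Tails_length (k : Nat) (j : Int) : ∀ t ∈ Tails k j, t.length = k := by
  induction k generalizing j with
  | zero => simp [Tails]
  | succ m ih =>
    intro t ht
    simp only [Tails, List.mem_append, List.mem_map] at ht
    rcases ht with ⟨s, hs, rfl⟩ | ⟨s, hs, rfl⟩ <;> simp [ih _ _ hs]

-- A's step appends exactly the two one-step extensions of each path.
theorem foldl_append_pair {α β : Type} (f g : β → α) (l : List β) (acc : List α) :
    l.foldl (fun np p => np ++ [f p, g p]) acc = acc ++ l.flatMap (fun p => [f p, g p]) := by
  induction l generalizing acc with
  | nil => simp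
  | cons x t ih => rw [List.foldl_cons, ih, List.flatMap_cons]; simp

theorem pf_step_eq (P : List (List Int)) :
    pf_step P = P.flatMap (fun p =>
      [p ++ [PySem.List.pyGetD p (-1) 0], p ++ [PySem.List.pyGetD p (-1) 0 + 1]]) := by
  have h : pf_step P = P.foldl (fun np p =>
      np ++ [p ++ [PySem.List.pyGetD p (-1) 0], p ++ [PySem.List.pyGetD p (-1) 0 + 1]]) [] := rfl
  rw [h, foldl_append_pair (fun p => p ++ [PySem.List.pyGetD p (-1) 0])
    (fun p => p ++ [PySem.List.pyGetD p (-1) 0 + 1]) P []]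
  simp

theorem pf_step_append (P Q : List (List Int)) :
    pf_step (P ++ Q) = pf_step P ++ pf_step Q := by
  simp [pf_step_eq]

theorem pf_iter_append (k : Nat) (P Q : List (List Int)) :
    pf_step^[k] (P ++ Q) = pf_step^[k] P ++ pf_step^[k] Q := by
  induction k generalizing P Q with
  | zero => rfl
  | succ m ih => simp [Function.iterate_succ_apply, pf_step_append, ih]

theorem pyGetD_last_append (p : List Int) (c : Int) :
    PySem.List.pyGetD (p ++ [c]) (-1) 0 = c := by
  simp [PySem.List.pyGetD, PySem.List.pyIdx?, PySem.List.pyGet?]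

-- k extension rounds on [p] (p ending at column j) produce p ++ t for all tails t.
theorem pf_iter_char : ∀ (k : Nat) (p : List Int) (j : Int),
    PySem.List.pyGetD p (-1) 0 = j →
    pf_step^[k] [p] = (Tails k j).map (p ++ ·) := by
  intro k
  induction k with
  | zero => intro p j _; simp [Tails]
  | succ m ih =>
    intro p j hj
    rw [Function.iterate_succ_apply]
    have h1 : pf_step [p] = [p ++ [j]] ++ [p ++ [j + 1]] := by
      simp [pf_step_eq, hj]
    rw [h1, pf_iter_append,
      ih (p ++ [j]) j (pyGetD_last_append p j),
      ih (p ++ [j + 1]) (j + 1) (pyGetD_last_append p (j + 1))]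
    simp [Tails, Function.comp_def, List.append_assoc]

-- A's inner range-fold is msum (front pairing), for paths at least as long as the grid.
theorem srange_key : ∀ (grid : List (List Int)) (p : List Int), grid.length ≤ p.length →
    ((List.range grid.length).map
      (fun k => PySem.List.pyGetD (grid.getD k []) (p.getD k 0) 0)).sum = msum grid p := by
  intro grid
  induction grid with
  | nil => simp
  | cons r rs ih =>
    intro p hp
    cases p with
    | nil => simp at hp
    | cons c q =>
      rw [List.length_cons, List.range_succ_eq_map, List.map_cons, List.map_map, List.sum_cons]
      simp only [Function.comp_def, List.getD_cons_succ, List.getD_cons_zero]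
      rw [ih q (by simpa using hp), msum]

theorem srange_eq_msum (grid : List (List Int)) (p : List Int)
    (hp : grid.length ≤ p.length) :
    (PySem.List.pyRange 0 (grid.length : Int) 1).foldl
      (fun acc i => acc + PySem.List.pyGetD (PySem.List.pyGetD grid i []) (PySem.List.pyGetD p i 0) 0) 0
    = msum grid p := by
  rw [PySem.List.foldl_add, PySem.List.pyRange_zero_nat, List.map_map, zero_add,
    ← srange_key grid p hp]
  congr 1
  refine List.map_congr_left (fun k _ => ?_)
  simp [PySem.List.pyGetD_natCast]

-- The maximum of msum over all tails equals the DP recurrence (shifted by one column).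
theorem bmax_tails : ∀ (k : Nat) (rs : List (List Int)) (j : Int), rs.length ≤ k →
    bmax ((Tails k j).map (msum rs)) = max (gspec rs j) (gspec rs (j + 1)) := by
  intro k
  induction k with
  | zero =>
    intro rs j h
    interval_cases h' : rs.length
    · cases rs with
      | nil => simp [Tails, bmax, gspec, msum]
      | cons r t => simp at h'
  | succ m ih =>
    intro rs j h
    have hne1 : (Tails m j).map (j :: ·) ≠ [] := by
      simp [Tails_ne_nil]
    have hne2 : (Tails m (j + 1)).map ((j + 1) :: ·) ≠ [] := by
      simp [Tails_ne_nil]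
    rw [show Tails (m + 1) j = (Tails m j).map (j :: ·) ++ (Tails m (j + 1)).map ((j + 1) :: ·) from rfl,
      List.map_append, List.map_map, List.map_map,
      bmax_append _ _ (by simpa using hne1) (by simpa using hne2)]
    cases rs with
    | nil =>
      have e : ∀ (c : Int), (msum [] ∘ (c :: ·)) = (fun t : List Int => (0 : Int)) := by
        intro c; funext t; simp [Function.comp_def]
      rw [e j, e (j + 1)]
      have z : ∀ (c : Int), bmax ((Tails m c).map (fun _ : List Int => (0 : Int))) = 0 := by
        intro c
        have := ih [] c (by simp)
        simpa [gspec, msum, Function.comp_def] using this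
      rw [z j, z (j + 1)]
      simp [gspec]
    | cons r rs' =>
      have e : ∀ (c : Int), (msum (r :: rs') ∘ (c :: ·))
          = (fun t => PySem.List.pyGetD r c 0 + msum rs' t) := by
        intro c; funext t; simp [msum]
      have hb : ∀ (c : Int), bmax ((Tails m c).map (fun t => PySem.List.pyGetD r c 0 + msum rs' t))
          = PySem.List.pyGetD r c 0 + max (gspec rs' c) (gspec rs' (c + 1)) := by
        intro c
        rw [show ((Tails m c).map (fun t => PySem.List.pyGetD r c 0 + msum rs' t))
            = ((Tails m c).map (msum rs')).map (fun x => PySem.List.pyGetD r c 0 + x) by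
          simp [List.map_map, Function.comp_def]]
        rw [bmax_map_add _ _ (by simp [Tails_ne_nil]),
          ih rs' c (by simp at h; omega)]
      rw [e j, e (j + 1), hb j, hb (j + 1)]
      simp [gspec]

-- A's path_finder produces [0] ++ t for every tail t.
theorem path_finder_eq (grid : List (List Int)) :
    path_finder grid = (Tails grid.length 0).map (fun t => (0 : Int) :: t) := by
  have h : path_finder grid
      = (PySem.List.pyRange 1 ((grid.length : Int) + 1) 1).foldl (fun paths _ => pf_step paths) [[0]] := rfl
  rw [h, List.foldl_const, PySem.List.length_pyRange_one,
    show ((((grid.length : Int) + 1) - 1).toNat) = grid.length by omega,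
    pf_iter_char grid.length [0] 0 (by decide)]
  simp

-- A computes max 0 (gspec grid 0).
theorem A_eq (grid : List (List Int)) :
    exhaustive_search grid = max 0 (gspec grid 0) := by
  have h : exhaustive_search grid = (path_finder grid).foldl (fun maximum path =>
      if ((PySem.List.pyRange 0 (grid.length : Int) 1).foldl
          (fun acc i => acc + PySem.List.pyGetD (PySem.List.pyGetD grid i []) (PySem.List.pyGetD path i 0) 0) 0) > maximum
      then ((PySem.List.pyRange 0 (grid.length : Int) 1).foldl
          (fun acc i => acc + PySem.List.pyGetD (PySem.List.pyGetD grid i []) (PySem.List.pyGetD path i 0) 0) 0)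
      else maximum) 0 := rfl
  have hmaxf : (fun (maximum : Int) (path : List Int) =>
      if ((PySem.List.pyRange 0 (grid.length : Int) 1).foldl
          (fun acc i => acc + PySem.List.pyGetD (PySem.List.pyGetD grid i []) (PySem.List.pyGetD path i 0) 0) 0) > maximum
      then ((PySem.List.pyRange 0 (grid.length : Int) 1).foldl
          (fun acc i => acc + PySem.List.pyGetD (PySem.List.pyGetD grid i []) (PySem.List.pyGetD path i 0) 0) 0)
      else maximum)
      = fun maximum path => max maximum ((PySem.List.pyRange 0 (grid.length : Int) 1).foldl
        (fun acc i => acc + PySem.List.pyGetD (PySem.List.pyGetD grid i []) (PySem.List.pyGetD path i 0) 0) 0) := by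
    funext m p
    rcases le_total ((PySem.List.pyRange 0 (grid.length : Int) 1).foldl
        (fun acc i => acc + PySem.List.pyGetD (PySem.List.pyGetD grid i []) (PySem.List.pyGetD p i 0) 0) 0) m with hc | hc
    · rw [if_neg (by omega), max_eq_left hc]
    · rw [max_eq_right hc]
      by_cases he : ((PySem.List.pyRange 0 (grid.length : Int) 1).foldl
        (fun acc i => acc + PySem.List.pyGetD (PySem.List.pyGetD grid i []) (PySem.List.pyGetD p i 0) 0) 0) > m
      · rw [if_pos he]
      · rw [if_neg he]; omega
  rw [h, path_finder_eq, hmaxf, ← List.foldl_map, List.map_map,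
    foldl_max_eq_bmax _ 0 (by simp [Tails_ne_nil])]
  have hS : ((Tails grid.length 0).map ((fun path => (PySem.List.pyRange 0 (grid.length : Int) 1).foldl
        (fun acc i => acc + PySem.List.pyGetD (PySem.List.pyGetD grid i []) (PySem.List.pyGetD path i 0) 0) 0)
        ∘ (fun t => (0 : Int) :: t)))
      = (Tails grid.length 0).map (fun t => msum grid ((0 : Int) :: t)) := by
    refine List.map_congr_left (fun t ht => ?_)
    have hlen : grid.length ≤ ((0 : Int) :: t).length := by
      simp [Tails_length grid.length 0 t ht]
    simpa using srange_eq_msum grid ((0 : Int) :: t) hlen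
  rw [hS]
  congr 1
  cases grid with
  | nil => simp [Tails, bmax, msum, gspec]
  | cons r rs =>
    have e : (fun t : List Int => msum (r :: rs) (0 :: t))
        = fun t => PySem.List.pyGetD r 0 0 + msum rs t := by
      funext t; simp [msum]
    rw [e, show ((Tails (r :: rs).length 0).map (fun t => PySem.List.pyGetD r 0 0 + msum rs t))
        = ((Tails (r :: rs).length 0).map (msum rs)).map (fun x => PySem.List.pyGetD r 0 0 + x) by
      simp [List.map_map, Function.comp_def]]
    rw [bmax_map_add _ _ (by simp [Tails_ne_nil]),
      bmax_tails (r :: rs).length rs 0 (by simp)]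
    simp [gspec]

-- B's row update, in Nat-indexed form.
theorem alt_step_eq (dp row : List Int) :
    alt_step dp row = (List.range (dp.length - 1)).map
      (fun j : Nat => PySem.List.pyGetD row (j : Int) 0 + max (dp.getD j 0) (dp.getD (j + 1) 0)) := by
  unfold alt_step
  rw [PySem.List.pyRange_one, show (((dp.length : Int) - 1) - 0).toNat = dp.length - 1 by omega,
    List.map_map]
  refine List.map_congr_left (fun k _ => ?_)
  simp only [Function.comp_def, zero_add]
  rw [PySem.List.pyGetD_natCast dp k 0,
    show ((k : Int) + 1) = ((k + 1 : Nat) : Int) by push_cast; ring,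
    PySem.List.pyGetD_natCast dp (k + 1) 0]

theorem dp_length (rs : List (List Int)) (m : Nat) (h : rs.length ≤ m) :
    (rs.foldr (fun row dp => alt_step dp row) (List.replicate m 0)).length = m - rs.length := by
  induction rs with
  | nil => simp
  | cons r rs' ih =>
    rw [List.foldr_cons, alt_step_eq]
    simp only [List.length_map, List.length_range, List.length_cons]
    rw [ih (by simp at h; omega)]
    simp at h; omega

theorem dp_getD (rs : List (List Int)) (m : Nat) :
    ∀ j : Nat, j + rs.length < m →
    (rs.foldr (fun row dp => alt_step dp row) (List.replicate m 0)).getD j 0 = gspec rs (j : Int) := by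
  induction rs with
  | nil =>
    intro j hj
    simp only [List.foldr_nil, gspec]
    simp [List.getD]
  | cons r rs' ih =>
    intro j hj
    simp only [List.length_cons] at hj
    have hmr := PySem.List.getD_map_range
      (fun k : Nat => PySem.List.pyGetD r (k : Int) 0 +
        max ((rs'.foldr (fun row dp => alt_step dp row) (List.replicate m 0)).getD k 0)
            ((rs'.foldr (fun row dp => alt_step dp row) (List.replicate m 0)).getD (k + 1) 0))
      ((rs'.foldr (fun row dp => alt_step dp row) (List.replicate m 0)).length - 1) j 0
      (by rw [dp_length rs' m (by omega)]; omega)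
    rw [List.foldr_cons, alt_step_eq, hmr]
    simp only [ih j (by omega), ih (j + 1) (by omega), gspec]
    push_cast
    ring_nf

-- B computes max (gspec grid 0) 0.
theorem B_eq (grid : List (List Int)) :
    exhaustive_search_alt grid = max (gspec grid 0) 0 := by
  have h : exhaustive_search_alt grid
      = max (PySem.List.pyGetD (grid.reverse.foldl alt_step (List.replicate (grid.length + 1) 0)) 0 0) 0 := rfl
  rw [h, List.foldl_reverse, PySem.List.pyGetD_ofNat',
    dp_getD grid (grid.length + 1) 0 (by omega)]
  simp

-- ===== VERDICT (by name: the statement is the Claim_ definition above) =====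
theorem exhaustive_search_spec : Claim_equal_exhaustive_search := by
  intro grid _ _
  unfold Spec_exhaustive_search
  rw [A_eq, B_eq, max_comm]
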